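-- pv_equiv track=rewrite | github.com/asthtls/coding_test | Programmers/lv0/코드처리하기.py | solution
-- ===== SOURCE A (Python) =====
-- def solution(code):
--     mode = 0
--     res = ""
--
--     for idx, c in enumerate(code):
--         if c == '1':
--             mode = 1 - mode
--         elif (mode == 0 and idx%2 ==0) or (mode == 1 and idx%2 == 1):
--             res += c
--
--     return res if res else "EMPTY"
-- ===== SOURCE B (Python) =====
-- def solution(code):
--     # Pass 1: prefix-parity table: parity[i] = parity of count of '1' strictly before index i.
--     parity = []
--     p = 0
--     for c in code:
--         parity.append(p)
--         if c == '1':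
--             p = 1 - p
--     # Pass 2: keep each non-'1' character whose index parity matches the table.
--     res = "".join(c for (i, c), p in zip(enumerate(code), parity) if c != '1' and i % 2 == p)
--     return res if res else "EMPTY"
-- ===== Notes on version B (the rewrite author's own statement) =====
-- stated objective: alternative
-- what changed: Replaces the single stateful toggle-scan with a two-pass shape: first materialize a prefix-parity table of the mode-toggle characters seen so far, then a separate filtering pass over enumerate plus the table selects the kept characters.
import Mathlib
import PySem

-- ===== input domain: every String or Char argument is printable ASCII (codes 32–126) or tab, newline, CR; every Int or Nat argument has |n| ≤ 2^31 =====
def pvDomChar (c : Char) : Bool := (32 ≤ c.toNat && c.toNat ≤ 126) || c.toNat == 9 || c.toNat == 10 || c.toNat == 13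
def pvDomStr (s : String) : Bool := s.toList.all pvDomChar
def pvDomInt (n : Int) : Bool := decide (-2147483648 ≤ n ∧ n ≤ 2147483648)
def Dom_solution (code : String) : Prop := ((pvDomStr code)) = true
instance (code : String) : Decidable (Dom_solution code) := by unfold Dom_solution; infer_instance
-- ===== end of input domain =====

-- B replaces A's single stateful toggle-scan by a two-pass shape (build a prefix-parity table, then filter); same cost, proved equal.


-- ===== PORT A =====
-- state-threading loop over enumerate(code): (mode, res)
def solAux : List (Int × Char) → Int → List Char → List Char
  | [], _, res => res
  | (idx, c) :: rest, mode, res =>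
    if c == '1' then solAux rest (1 - mode) res
    else if (mode == 0 && PySem.Int.mod idx 2 == 0) || (mode == 1 && PySem.Int.mod idx 2 == 1) then
      solAux rest mode (res ++ [c])
    else solAux rest mode res

def solution (code : String) : String :=
  let res := solAux (PySem.List.enumerate code.toList) 0 []
  if res.isEmpty then "EMPTY" else String.ofList res

-- ===== PORT B =====
-- pass 1: the prefix-parity table
def parityTable : List Char → Int → List Int
  | [], _ => []
  | c :: cs, p => p :: parityTable cs (if c == '1' then 1 - p else p)

def solution_alt (code : String) : String :=
  let cs := code.toList
  let par := parityTable cs 0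
  -- pass 2: filter over zip(enumerate(code), parity)
  let kept := (((PySem.List.enumerate cs).zip par).filter
      (fun x => x.1.2 != '1' && PySem.Int.mod x.1.1 2 == x.2)).map (fun x => x.1.2)
  if kept.isEmpty then "EMPTY" else String.ofList kept

-- ===== PRECONDITION & SPEC =====
def Spec_solution (code : String) (out : String) : Prop := out = solution_alt code
instance (code : String) (out : String) : Decidable (Spec_solution code out) := by unfold Spec_solution; infer_instance

-- ===== CLAIM (what is proved, stated in full; the proofs are below) =====
def Claim_equal_solution : Prop := ∀ (code : String), Dom_solution code → Spec_solution code (solution code)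

-- ===== LEMMAS AND PROOFS =====
theorem solAux_eq (cs : List Char) : ∀ (s mode : Int) (res : List Char),
    (mode = 0 ∨ mode = 1) →
    solAux (PySem.List.enumerate cs s) mode res =
      res ++ (((PySem.List.enumerate cs s).zip (parityTable cs mode)).filter
        (fun x => x.1.2 != '1' && PySem.Int.mod x.1.1 2 == x.2)).map (fun x => x.1.2) := by
  induction cs with
  | nil => intro s mode res _; simp [PySem.List.enumerate_nil, solAux]
  | cons c cs ih =>
    intro s mode res hm
    rw [PySem.List.enumerate_cons]
    by_cases hc : c = '1'
    · subst hc
      simp only [solAux, parityTable, List.zip_cons_cons, List.filter_cons, BEq.rfl, if_true,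
        bne_self_eq_false, Bool.false_and, Bool.false_eq_true, if_false]
      exact ih (s + 1) (1 - mode) res (by omega)
    · have hcb : (c == '1') = false := by simp [hc]
      have hcbne : (c != '1') = true := by simp [bne, hcb]
      simp only [solAux, parityTable, List.zip_cons_cons, List.filter_cons, hcb,
        Bool.false_eq_true, if_false, hcbne, Bool.true_and]
      have h0 : 0 ≤ PySem.Int.mod s 2 := PySem.Int.mod_nonneg s (by norm_num)
      have h1 : PySem.Int.mod s 2 < 2 := PySem.Int.mod_lt s (by norm_num)
      have hcond : ((mode == 0 && PySem.Int.mod s 2 == 0) ||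
          (mode == 1 && PySem.Int.mod s 2 == 1)) = (PySem.Int.mod s 2 == mode) := by
        have hmod : PySem.Int.mod s 2 = 0 ∨ PySem.Int.mod s 2 = 1 := by omega
        rcases hm with h | h <;> rcases hmod with h2 | h2 <;> rw [h, h2] <;> decide
      rw [hcond]
      by_cases hsel : PySem.Int.mod s 2 = mode
      · rw [if_pos (beq_iff_eq.mpr hsel), if_pos (beq_iff_eq.mpr hsel), List.map_cons,
          ih (s + 1) mode (res ++ [c]) hm, List.append_assoc, List.singleton_append]
      · rw [if_neg (fun h => hsel (beq_iff_eq.mp h)), if_neg (fun h => hsel (beq_iff_eq.mp h))]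
        exact ih (s + 1) mode res hm

-- ===== VERDICT (by name: the statement is the Claim_ definition above) =====
theorem solution_spec : Claim_equal_solution := by
  intro code _
  unfold Spec_solution solution solution_alt
  rw [solAux_eq code.toList 0 0 [] (Or.inl rfl)]
  simp
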